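-- pv_equiv track=rewrite | github.com/andyscanzio/advent-of-code-2015 | day06.py | part1
-- ===== SOURCE A (Python) =====
-- def part1(text: str) -> int:
--     grid = [[0] * 1000 for _ in range(1000)]
--     for line in text.splitlines():
--         x1, x2, y1, y2 = 0, 0, 0, 0
--         state = ""
--         match line.split():
--             case [s, p1, "through", p2]:
--                 state = s
--                 x1, y1 = tuple(map(int, p1.split(",")))
--                 x2, y2 = tuple(map(int, p2.split(",")))
--             case ["turn", s, p1, "through", p2]:
--                 state = s
--                 x1, y1 = tuple(map(int, p1.split(",")))
--                 x2, y2 = tuple(map(int, p2.split(",")))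
--             case _:
--                 pass
--         for x in range(x1, x2 + 1):
--             for y in range(y1, y2 + 1):
--                 if state == "on":
--                     grid[x][y] = 1
--                 elif state == "off":
--                     grid[x][y] = 0
--                 else:
--                     grid[x][y] = 1 - grid[x][y]
--     return sum(sum(cell for cell in line) for line in grid)
-- ===== SOURCE B (Python) =====
-- def part1(text: str) -> int:
--     # Parse each line into (state, x1, y1, x2, y2); unrecognised lines keep the
--     # defaults. Then, instead of simulating a 1000x1000 grid, compress the x/y
--     # boundary coordinates into blocks on which every instruction acts
--     # uniformly, fold the instruction list once per block and weight the final
--     # state of each block by its area.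
--     instrs = []
--     for line in text.splitlines():
--         state, x1, y1, x2, y2 = "", 0, 0, 0, 0
--         words = line.split()
--         if len(words) == 5 and words[0] == "turn":
--             words = words[1:]
--         if len(words) == 4 and words[2] == "through":
--             state = words[0]
--             x1, y1 = map(int, words[1].split(","))
--             x2, y2 = map(int, words[3].split(","))
--         instrs.append((state, x1, y1, x2, y2))
--     xb = sorted({0, 1000} | {v for (_, x1, _, x2, _) in instrs for v in (x1, x2 + 1) if 0 < v < 1000})
--     yb = sorted({0, 1000} | {v for (_, _, y1, _, y2) in instrs for v in (y1, y2 + 1) if 0 < v < 1000})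
--     total = 0
--     for xl, xr in zip(xb, xb[1:]):
--         cover = [(st, y1, y2) for (st, x1, y1, x2, y2) in instrs if x1 <= xl and xr <= x2 + 1]
--         for yl, yr in zip(yb, yb[1:]):
--             s = 0
--             for (st, y1, y2) in cover:
--                 if y1 <= yl and yr <= y2 + 1:
--                     s = 1 if st == "on" else (0 if st == "off" else 1 - s)
--             total += s * (xr - xl) * (yr - yl)
--     return total
-- ===== Notes on version B (the rewrite author's own statement) =====
-- stated objective: faster
-- what changed: B never materialises the 1000x1000 grid: it parses all lines once, compresses the x/y boundary coordinates into blocks on which every instruction acts uniformly, folds the instruction list once per block and sums block-state times block area; Pre_ excludes lines whose coordinate pairs do not parse as ints (A raises ValueError) and instruction lines with a coordinate outside the grid's natural 0..999 range, where A wraps negative list indices or raises IndexError.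
-- outside the precondition, e.g. on part1('toggle -1,-1 through -1,-1'): A returns 1, B returns 0; on part1('turn on 1000,1 through 999,1'): A returns 0, B returns 0
import Mathlib
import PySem

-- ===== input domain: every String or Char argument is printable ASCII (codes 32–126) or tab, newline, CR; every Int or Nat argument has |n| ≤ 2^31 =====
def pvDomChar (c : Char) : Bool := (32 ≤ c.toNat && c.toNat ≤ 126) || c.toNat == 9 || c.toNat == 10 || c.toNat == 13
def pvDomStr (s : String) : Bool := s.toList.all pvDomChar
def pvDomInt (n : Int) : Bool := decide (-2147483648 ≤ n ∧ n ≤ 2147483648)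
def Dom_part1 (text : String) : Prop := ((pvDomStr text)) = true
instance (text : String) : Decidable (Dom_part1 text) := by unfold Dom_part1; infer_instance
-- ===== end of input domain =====

-- B replaces A's 1000×1000 mutable grid by coordinate compression (parse once, fold the
-- instruction list per compressed block, weight by area); objective: faster by a large
-- constant factor. Equality is proved on Pre_part1 (coordinate pairs parse, coordinates in 0..999).

-- ===== PORT A =====
-- tuple(map(int, p.split(","))) unpacked into two ints; none = ValueError/unpacking error (outside Pre_part1)
def part1Pair (p : String) : Option (Int × Int) :=
  match PySem.Str.split? p "," with
  | some [a, b] =>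
    match PySem.Int.ofStr? a, PySem.Int.ofStr? b with
    | some x, some y => some (x, y)
    | _, _ => none
  | _ => none

-- the per-line match statement of A; the junk value ("",0,0,0,0) stands where Python raises (outside Pre_part1)
def part1Parse (line : String) : String × Int × Int × Int × Int :=
  match PySem.Str.split₀ line with
  | [s, p1, "through", p2] =>
    match part1Pair p1, part1Pair p2 with
    | some (x1, y1), some (x2, y2) => (s, x1, y1, x2, y2)
    | _, _ => ("", 0, 0, 0, 0)
  | ["turn", s, p1, "through", p2] =>
    match part1Pair p1, part1Pair p2 with
    | some (x1, y1), some (x2, y2) => (s, x1, y1, x2, y2)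
    | _, _ => ("", 0, 0, 0, 0)
  | _ => ("", 0, 0, 0, 0)

-- grid[x][y] = 1 / 0 / 1 - grid[x][y]  (Python index semantics via pyGetD/pySetD; Pre_part1 keeps indices in range)
def part1Write (st : String) (x : Int) (g : List (List Int)) (y : Int) : List (List Int) :=
  PySem.List.pySetD g x (PySem.List.pySetD (PySem.List.pyGetD g x []) y
    (if st = "on" then 1 else if st = "off" then 0 else 1 - PySem.List.pyGetD (PySem.List.pyGetD g x []) y 0))

-- the two nested for-loops of A
def part1Apply (g : List (List Int)) (i : String × Int × Int × Int × Int) : List (List Int) :=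
  match i with
  | (st, x1, y1, _x2, y2) =>
    (PySem.List.pyRange x1 (_x2 + 1)).foldl (fun g x =>
      (PySem.List.pyRange y1 (y2 + 1)).foldl (fun g y => part1Write st x g y) g) g

def part1 (text : String) : Int :=
  let grid0 : List (List Int) := List.replicate 1000 (List.replicate 1000 0)
  let grid := (PySem.Str.splitlines text).foldl (fun g line => part1Apply g (part1Parse line)) grid0
  (grid.map (fun row => row.sum)).sum

-- ===== PORT B =====
-- x, y = map(int, p.split(",")): apply int to every part, then unpack exactly two
def altPair (p : String) : Option (Int × Int) :=
  match ((PySem.Str.split? p ",").getD []).map PySem.Int.ofStr? with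
  | [some x, some y] => some (x, y)
  | _ => none

-- one iteration of B's parse loop: defaults, optional "turn" strip, 4-word "through" form;
-- the default also stands where Python B raises ValueError on int() (outside Pre_part1)
def altParse (line : String) : String × Int × Int × Int × Int :=
  let w0 := PySem.Str.split₀ line
  let w := if w0.length = 5 ∧ w0.headD "" = "turn" then w0.tail else w0
  if w.length = 4 ∧ w.getD 2 "" = "through" then
    match altPair (w.getD 1 ""), altPair (w.getD 3 "") with
    | some (x1, y1), some (x2, y2) => (w.getD 0 "", x1, y1, x2, y2)
    | _, _ => ("", 0, 0, 0, 0)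
  else ("", 0, 0, 0, 0)

-- sorted({0, 1000} | {v for … if 0 < v < 1000})
def altBounds (vs : List Int) : List Int :=
  PySem.List.sorted
    (PySem.Set.ofList (0 :: 1000 :: vs.filter (fun v => decide (0 < v ∧ v < 1000))))
    (fun x => x) false

def part1_alt (text : String) : Int :=
  let instrs := (PySem.Str.splitlines text).map altParse
  let xb := altBounds (instrs.flatMap (fun i => [i.2.1, i.2.2.2.1 + 1]))
  let yb := altBounds (instrs.flatMap (fun i => [i.2.2.1, i.2.2.2.2 + 1]))
  (xb.zip xb.tail).foldl (fun total xp =>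
    let cover := instrs.filterMap (fun i =>
      if i.2.1 ≤ xp.1 ∧ xp.2 ≤ i.2.2.2.1 + 1 then some (i.1, i.2.2.1, i.2.2.2.2) else none)
    (yb.zip yb.tail).foldl (fun total yp =>
      let s := cover.foldl (fun s c =>
        if c.2.1 ≤ yp.1 ∧ yp.2 ≤ c.2.2 + 1 then
          (if c.1 = "on" then 1 else if c.1 = "off" then 0 else 1 - s)
        else s) 0
      total + s * (xp.2 - xp.1) * (yp.2 - yp.1)) total) 0

-- ===== PRECONDITION & SPEC =====
-- closed-form shape of an instruction-shaped line (used only by Pre_, not by the ports)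
def lineShape? (line : String) : Option (String × String) :=
  match PySem.Str.split₀ line with
  | [_, p1, "through", p2] => some (p1, p2)
  | ["turn", _, p1, "through", p2] => some (p1, p2)
  | _ => none

def pairVal? (p : String) : Option (Int × Int) :=
  match PySem.Str.split? p "," with
  | some [a, b] =>
    (PySem.Int.ofStr? a).bind fun x => (PySem.Int.ofStr? b).map fun y => (x, y)
  | _ => none

def lineOk (l : String) : Bool :=
  match lineShape? l with
  | none => true
  | some (p1, p2) =>
    match pairVal? p1, pairVal? p2 with
    | some (x1, y1), some (x2, y2) =>
      decide (0 ≤ x1 ∧ x1 ≤ 999 ∧ 0 ≤ y1 ∧ y1 ≤ 999 ∧ 0 ≤ x2 ∧ x2 ≤ 999 ∧ 0 ≤ y2 ∧ y2 ≤ 999)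
    | _, _ => false

-- Pre_ excludes instruction-shaped lines whose coordinate pairs do not parse as ints (A raises
-- ValueError) and instruction lines with a coordinate outside the grid's natural range 0..999,
-- where A wraps negative list indices or raises IndexError: outside the puzzle's natural domain.
def Pre_part1 (text : String) : Prop :=
  ∀ l ∈ PySem.Str.splitlines text, lineOk l = true
instance (text : String) : Decidable (Pre_part1 text) := by unfold Pre_part1; infer_instance

def pvWitness_part1 : String := "turn on 0,0 through 1,1"

def Spec_part1 (text : String) (out : Int) : Prop := out = part1_alt text
instance (text : String) (out : Int) : Decidable (Spec_part1 text out) := by unfold Spec_part1; infer_instance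

-- ===== CLAIM (what is proved, stated in full; the proofs are below) =====
def Claim_equal_part1 : Prop :=
  ∀ (text : String), Dom_part1 text → Pre_part1 text → Spec_part1 text (part1 text)

-- ===== LEMMAS AND PROOFS =====

-- ---------- parsing lemmas ----------

theorem altPair_eq (p : String) : altPair p = part1Pair p := by
  unfold altPair part1Pair
  rcases h : PySem.Str.split? p "," with _ | w
  · rfl
  · rcases w with _ | ⟨a, _ | ⟨b, _ | ⟨c, t⟩⟩⟩
    · rfl
    · dsimp only [Option.getD, List.map]
      rcases PySem.Int.ofStr? a with _ | x <;> rfl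
    · dsimp only [Option.getD, List.map]
      rcases PySem.Int.ofStr? a with _ | x <;> rcases PySem.Int.ofStr? b with _ | y <;> rfl
    · dsimp only [Option.getD, List.map]
      rcases PySem.Int.ofStr? a with _ | x <;> rcases PySem.Int.ofStr? b with _ | y <;> rfl

theorem pairVal_eq (p : String) : pairVal? p = part1Pair p := by
  unfold pairVal? part1Pair
  rcases h : PySem.Str.split? p "," with _ | w
  · rfl
  · rcases w with _ | ⟨a, _ | ⟨b, _ | ⟨c, t⟩⟩⟩
    · rfl
    · rfl
    · dsimp only
      rcases PySem.Int.ofStr? a with _ | x <;> rcases PySem.Int.ofStr? b with _ | y <;> rfl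
    · rfl

theorem alt_parse_eq (l : String) : altParse l = part1Parse l := by
  unfold altParse part1Parse
  rcases hw : PySem.Str.split₀ l with _ | ⟨a, _ | ⟨b, _ | ⟨c, _ | ⟨d, _ | ⟨e, _ | ⟨f, t⟩⟩⟩⟩⟩⟩ <;>
    simp [altPair_eq, List.getD] <;> try rfl
  · -- 4 words
    by_cases hc : c = "through" <;> simp [hc]
  · -- 5 words
    by_cases ha : a = "turn" <;> by_cases hd : d = "through" <;> simp [ha, hd]

-- a closed-form reading of the coordinates A's parse produces (proof helper)
def lineVal? (line : String) : Option (Int × Int × Int × Int) :=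
  match lineShape? line with
  | some (p1, p2) =>
    match pairVal? p1, pairVal? p2 with
    | some (x1, y1), some (x2, y2) => some (x1, y1, x2, y2)
    | _, _ => none
  | none => none

theorem parse_coords (l : String) :
    (part1Parse l).2 = (lineVal? l).getD (0, 0, 0, 0) := by
  unfold part1Parse lineVal? lineShape?
  rcases hw : PySem.Str.split₀ l with _ | ⟨a, _ | ⟨b, _ | ⟨c, _ | ⟨d, _ | ⟨e, _ | ⟨f, t⟩⟩⟩⟩⟩⟩ <;>
    simp [pairVal_eq] <;> try rfl
  · by_cases hc : c = "through" <;> simp [hc, pairVal_eq] <;>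
      rcases part1Pair b with _ | ⟨x1, y1⟩ <;> rcases part1Pair d with _ | ⟨x2, y2⟩ <;> simp
  · by_cases ha : a = "turn" <;> by_cases hd : d = "through" <;> simp [ha, hd, pairVal_eq] <;>
      rcases part1Pair c with _ | ⟨x1, y1⟩ <;> rcases part1Pair e with _ | ⟨x2, y2⟩ <;> simp

-- a line admitted by Pre_ yields an instruction fully inside the grid (or the default)
def instrOk (i : String × Int × Int × Int × Int) : Prop :=
  i.2.1 ≤ i.2.2.2.1 → i.2.2.1 ≤ i.2.2.2.2 →
    0 ≤ i.2.1 ∧ i.2.2.2.1 ≤ 999 ∧ 0 ≤ i.2.2.1 ∧ i.2.2.2.2 ≤ 999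

theorem parse_ok (l : String) (hok : lineOk l = true) : instrOk (part1Parse l) := by
  have hc := parse_coords l
  rcases hP : part1Parse l with ⟨st, a1, b1, a2, b2⟩
  rw [hP] at hc
  unfold instrOk
  simp only []
  rcases hv : lineVal? l with _ | ⟨x1, y1, x2, y2⟩ <;> rw [hv] at hc <;> simp at hc
  · obtain ⟨h1, h2, h3, h4⟩ := hc; subst h1; subst h2; subst h3; subst h4
    intro _ _; omega
  · obtain ⟨h1, h2, h3, h4⟩ := hc; subst h1; subst h2; subst h3; subst h4
    unfold lineOk at hok
    unfold lineVal? at hv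
    rcases hs : lineShape? l with _ | ⟨p1, p2⟩ <;> rw [hs] at hok hv
    · simp at hv
    · dsimp only at hok hv
      rcases hp1 : pairVal? p1 with _ | ⟨u1, v1⟩ <;>
        rcases hp2 : pairVal? p2 with _ | ⟨u2, v2⟩ <;>
          rw [hp1, hp2] at hok hv
      · exact absurd hv (by simp)
      · exact absurd hv (by simp)
      · exact absurd hv (by simp)
      · simp only [Option.some.injEq, Prod.mk.injEq] at hv
        obtain ⟨e1, e2, e3, e4⟩ := hv
        subst e1; subst e2; subst e3; subst e4
        simp only [decide_eq_true_eq] at hok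
        intro _ _; omega

-- ---------- the pointwise semantics of one instruction ----------

def updSt (st : String) (v : Int) : Int :=
  if st = "on" then 1 else if st = "off" then 0 else 1 - v

def cellApp (x y : Int) (v : Int) (i : String × Int × Int × Int × Int) : Int :=
  if i.2.1 ≤ x ∧ x ≤ i.2.2.2.1 ∧ i.2.2.1 ≤ y ∧ y ≤ i.2.2.2.2 then updSt i.1 v else v

def cellVal (instrs : List (String × Int × Int × Int × Int)) (x y : Int) : Int :=
  instrs.foldl (fun v i => cellApp x y v i) 0

def GShape (g : List (List Int)) : Prop :=
  g.length = 1000 ∧ ∀ (r : Nat) (h : r < g.length), g[r].length = 1000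

/-- total cell access (no dependent index proofs) -/
def gcell (g : List (List Int)) (r c : Nat) : Int := ((g[r]?).getD [])[c]?.getD 0

theorem gcell_eq (g : List (List Int)) (r c : Nat) (hr : r < g.length)
    (hc : c < (g[r]'hr).length) : gcell g r c = (g[r]'hr)[c]'hc := by
  unfold gcell
  rw [List.getElem?_eq_getElem hr]
  simp [List.getElem?_eq_getElem hc]

theorem gcell_set (g : List (List Int)) (i : Nat) (row : List Int) (hi : i < g.length)
    (r c : Nat) :
    gcell (g.set i row) r c = if i = r then row[c]?.getD 0 else gcell g r c := by
  unfold gcell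
  by_cases h : i = r
  · subst h
    rw [List.getElem?_set_self' ]
    simp [List.getElem?_eq_getElem hi]
  · rw [List.getElem?_set_ne h, if_neg h]

theorem rowcell_set (row : List Int) (j : Nat) (v : Int) (hj : j < row.length) (c : Nat) :
    ((row.set j v)[c]?).getD 0 = if j = c then v else (row[c]?).getD 0 := by
  by_cases h : j = c
  · subst h
    rw [List.getElem?_set_self']
    simp [hj]
  · rw [List.getElem?_set_ne h, if_neg h]

theorem inner_write (st : String) (x y2 : Int) (hx0 : 0 ≤ x) (hx1 : x < 1000) (hy2 : y2 ≤ 999) :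
    ∀ (n : Nat) (b : Int) (g : List (List Int)), GShape g → 0 ≤ b → (y2 + 1 - b).toNat = n →
      GShape ((PySem.List.pyRange b (y2 + 1)).foldl (fun g y => part1Write st x g y) g) ∧
      ∀ (r c : Nat), r < 1000 → c < 1000 →
        gcell ((PySem.List.pyRange b (y2 + 1)).foldl (fun g y => part1Write st x g y) g) r c
          = if (r : Int) = x ∧ b ≤ (c : Int) ∧ (c : Int) ≤ y2
            then updSt st (gcell g r c) else gcell g r c := by
  intro n
  induction n with
  | zero =>
    intro b g hg hb hn
    rw [PySem.List.pyRange_one_eq_nil (by omega)]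
    refine ⟨hg, ?_⟩
    intro r c hr hc
    simp only [List.foldl_nil]
    rw [if_neg (by omega)]
  | succ n IH =>
    intro b g hg hb hn
    have hglen : g.length = 1000 := hg.1
    have hxlt : x.toNat < g.length := by omega
    have hrowlen : (g[x.toNat]'hxlt).length = 1000 := hg.2 _ _
    have hbrow : b.toNat < (g[x.toNat]'hxlt).length := by omega
    have hwrite : part1Write st x g b
        = g.set x.toNat ((g[x.toNat]'hxlt).set b.toNat
            (updSt st ((g[x.toNat]'hxlt)[b.toNat]'hbrow))) := by
      unfold part1Write updSt
      rw [PySem.List.pyGetD_eq_getElem g [] hx0 (by omega)]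
      rw [PySem.List.pyGetD_eq_getElem _ 0 hb (by omega)]
      rw [PySem.List.pySetD_of_nonneg _ _ hb, PySem.List.pySetD_of_nonneg _ _ hx0]
    have hg1 : GShape (g.set x.toNat ((g[x.toNat]'hxlt).set b.toNat
        (updSt st ((g[x.toNat]'hxlt)[b.toNat]'hbrow)))) := by
      refine ⟨by simp [hglen], ?_⟩
      intro r hr
      rw [List.getElem_set]
      split
      · simp [hrowlen]
      · exact hg.2 _ _
    rw [PySem.List.pyRange_one_cons (by omega : b < y2 + 1)]
    simp only [List.foldl_cons]
    rw [hwrite]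
    obtain ⟨ihS, ihC⟩ := IH (b + 1) _ hg1 (by omega) (by omega)
    refine ⟨ihS, ?_⟩
    intro r c hr hc
    rw [ihC r c hr hc]
    have hcell : gcell (g.set x.toNat ((g[x.toNat]'hxlt).set b.toNat
          (updSt st ((g[x.toNat]'hxlt)[b.toNat]'hbrow)))) r c
        = if r = x.toNat ∧ c = b.toNat
          then updSt st (gcell g r c) else gcell g r c := by
      rw [gcell_set _ _ _ hxlt]
      by_cases hrx : x.toNat = r
      · rw [if_pos hrx]
        rw [rowcell_set _ _ _ hbrow]
        by_cases hcb : b.toNat = c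
        · rw [if_pos hcb, if_pos (by omega)]
          subst hrx; subst hcb
          rw [gcell_eq g x.toNat b.toNat hxlt hbrow]
        · rw [if_neg hcb, if_neg (by omega)]
          subst hrx
          unfold gcell
          rw [List.getElem?_eq_getElem hxlt]
          simp
      · rw [if_neg hrx, if_neg (by omega)]
    rw [hcell]
    split_ifs <;> first | rfl | omega

theorem outer_write (st : String) (x2 y1 y2 : Int) (hx2 : x2 ≤ 999) (hy1 : 0 ≤ y1) (hy2 : y2 ≤ 999) :
    ∀ (n : Nat) (a : Int) (g : List (List Int)), GShape g → 0 ≤ a → (x2 + 1 - a).toNat = n →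
      GShape ((PySem.List.pyRange a (x2 + 1)).foldl
        (fun g x => (PySem.List.pyRange y1 (y2 + 1)).foldl (fun g y => part1Write st x g y) g) g) ∧
      ∀ (r c : Nat), r < 1000 → c < 1000 →
        gcell ((PySem.List.pyRange a (x2 + 1)).foldl
            (fun g x => (PySem.List.pyRange y1 (y2 + 1)).foldl (fun g y => part1Write st x g y) g) g) r c
          = if a ≤ (r : Int) ∧ (r : Int) ≤ x2 ∧ y1 ≤ (c : Int) ∧ (c : Int) ≤ y2
            then updSt st (gcell g r c) else gcell g r c := by
  intro n
  induction n with
  | zero =>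
    intro a g hg ha hn
    rw [PySem.List.pyRange_one_eq_nil (show x2 + 1 ≤ a by omega)]
    refine ⟨hg, ?_⟩
    intro r c hr hc
    simp only [List.foldl_nil]
    rw [if_neg (by omega)]
  | succ n IH =>
    intro a g hg ha hn
    rw [PySem.List.pyRange_one_cons (show a < x2 + 1 by omega)]
    simp only [List.foldl_cons]
    obtain ⟨inS, inC⟩ := inner_write st a y2 ha (by omega) hy2 (y2 + 1 - y1).toNat y1 g hg hy1 rfl
    obtain ⟨ihS, ihC⟩ := IH (a + 1) _ inS (by omega) (by omega)
    refine ⟨ihS, ?_⟩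
    intro r c hr hc
    rw [ihC r c hr hc, inC r c hr hc]
    split_ifs <;> first | rfl | omega

theorem apply_cell (i : String × Int × Int × Int × Int) (hok : instrOk i)
    (g : List (List Int)) (hg : GShape g) :
    GShape (part1Apply g i) ∧
    ∀ (r c : Nat), r < 1000 → c < 1000 →
      gcell (part1Apply g i) r c = cellApp (r : Int) (c : Int) (gcell g r c) i := by
  obtain ⟨st, x1, y1, x2, y2⟩ := i
  unfold part1Apply
  simp only []
  unfold instrOk at hok
  simp only [] at hok
  by_cases hy : y1 ≤ y2
  · by_cases hx : x1 ≤ x2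
    · obtain ⟨hx1, hx2, hy1, hy2⟩ := hok hx hy
      obtain ⟨oS, oC⟩ := outer_write st x2 y1 y2 hx2 hy1 hy2 (x2 + 1 - x1).toNat x1 g hg hx1 rfl
      refine ⟨oS, ?_⟩
      intro r c hr hc
      rw [oC r c hr hc]
      unfold cellApp updSt
      dsimp only
    · rw [PySem.List.pyRange_one_eq_nil (show x2 + 1 ≤ x1 by omega)]
      simp only [List.foldl_nil]
      refine ⟨hg, ?_⟩
      intro r c hr hc
      unfold cellApp
      dsimp only
      rw [if_neg (by omega)]
  · have hnil : PySem.List.pyRange y1 (y2 + 1) = [] := PySem.List.pyRange_one_eq_nil (by omega)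
    rw [hnil]
    simp only [List.foldl_nil]
    rw [PySem.List.foldl_ignore]
    refine ⟨hg, ?_⟩
    intro r c hr hc
    unfold cellApp
    dsimp only
    rw [if_neg (by omega)]

theorem fold_apply (instrs : List (String × Int × Int × Int × Int))
    (hok : ∀ i ∈ instrs, instrOk i) :
    ∀ (g : List (List Int)), GShape g →
    GShape (instrs.foldl part1Apply g) ∧
    ∀ (r c : Nat), r < 1000 → c < 1000 →
      gcell (instrs.foldl part1Apply g) r c
        = instrs.foldl (fun v i => cellApp (r : Int) (c : Int) v i) (gcell g r c) := by
  induction instrs with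
  | nil => intro g hg; exact ⟨hg, fun _ _ _ _ => rfl⟩
  | cons i rest IH =>
    intro g hg
    simp only [List.foldl_cons]
    obtain ⟨aS, aC⟩ := apply_cell i (hok i (by simp)) g hg
    obtain ⟨fS, fC⟩ := IH (fun j hj => hok j (by simp [hj])) _ aS
    refine ⟨fS, ?_⟩
    intro r c hr hc
    rw [fC r c hr hc, aC r c hr hc]

-- ---------- A's total as a double range sum ----------

set_option maxRecDepth 4096 in
theorem partA_sum (text : String)
    (hok : ∀ i ∈ (PySem.Str.splitlines text).map part1Parse, instrOk i) :
    part1 text =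
      ((List.range 1000).map (fun (r : Nat) =>
        ((List.range 1000).map (fun (c : Nat) =>
          cellVal ((PySem.Str.splitlines text).map part1Parse) (r : Int) (c : Int))).sum)).sum := by
  rw [show part1 text
      = (((PySem.Str.splitlines text).foldl (fun g line => part1Apply g (part1Parse line))
          (List.replicate 1000 (List.replicate 1000 (0 : Int)))).map (fun row => row.sum)).sum
    from rfl]
  rw [← List.foldl_map (f := part1Parse) (g := part1Apply)]
  have hg0 : GShape (List.replicate 1000 (List.replicate 1000 (0 : Int))) := by
    refine ⟨List.length_replicate, ?_⟩
    intro r h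
    rw [List.getElem_replicate]
    exact List.length_replicate
  obtain ⟨fS, fC⟩ := fold_apply _ hok _ hg0
  have hgrid : (((PySem.Str.splitlines text).map part1Parse).foldl part1Apply
        (List.replicate 1000 (List.replicate 1000 (0 : Int))))
      = (List.range 1000).map (fun (r : Nat) => (List.range 1000).map (fun (c : Nat) =>
          cellVal ((PySem.Str.splitlines text).map part1Parse) (r : Int) (c : Int))) := by
    apply List.ext_getElem
    · rw [fS.1, List.length_map, List.length_range]
    · intro r h1 h2
      have hr1000 : r < 1000 := by have := fS.1; omega
      rw [List.getElem_map, List.getElem_range]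
      apply List.ext_getElem
      · rw [fS.2 r h1, List.length_map, List.length_range]
      · intro c hc1 hc2
        have hc1000 : c < 1000 := by have := fS.2 r h1; omega
        rw [List.getElem_map, List.getElem_range]
        have hbase : gcell (List.replicate 1000 (List.replicate 1000 (0 : Int))) r c = 0 := by
          unfold gcell
          rw [List.getElem?_replicate, if_pos hr1000]
          rw [Option.getD_some, List.getElem?_replicate, if_pos hc1000, Option.getD_some]
        have hfc := fC r c hr1000 hc1000
        rw [gcell_eq _ r c h1 hc1, hbase] at hfc
        rw [hfc]
        rfl
  rw [hgrid, List.map_map]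
  exact congrArg List.sum (List.map_congr_left (fun r _ => rfl))

-- ---------- coordinate-compression lemmas (B's side) ----------

theorem adj_facts {b : List Int} (hp : b.Pairwise (· < ·)) {l r : Int}
    (hadj : (l, r) ∈ b.zip b.tail) :
    l ∈ b ∧ r ∈ b ∧ l < r ∧ ∀ v ∈ b, v ≤ l ∨ r ≤ v := by
  obtain ⟨i, hi, hget⟩ := List.getElem_of_mem hadj
  rw [List.getElem_zip] at hget
  have hlen : i < b.tail.length := by
    simp only [List.length_zip] at hi; omega
  have hi1 : i + 1 < b.length := by
    have := List.length_tail (l := b); omega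
  have hib : i < b.length := by omega
  have hl : b[i] = l := by rw [Prod.ext_iff] at hget; exact hget.1
  have hr : b.tail[i] = r := by rw [Prod.ext_iff] at hget; exact hget.2
  rw [List.getElem_tail] at hr
  have hmono := List.pairwise_iff_getElem.mp hp
  refine ⟨hl ▸ List.getElem_mem hib, hr ▸ List.getElem_mem hi1, ?_, ?_⟩
  · rw [← hl, ← hr]; exact hmono i (i + 1) hib hi1 (by omega)
  · intro v hv
    obtain ⟨j, hj, hvj⟩ := List.getElem_of_mem hv
    rcases Nat.lt_or_ge j (i + 1) with h | h
    · rcases Nat.lt_or_ge j i with h' | h'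
      · exact Or.inl (le_of_lt (hvj ▸ hl ▸ hmono j i hj hib h'))
      · have : j = i := by omega
        subst this
        exact Or.inl (le_of_eq (hvj ▸ hl ▸ rfl))
    · rcases Nat.lt_or_ge (i + 1) j with h' | h'
      · exact Or.inr (le_of_lt (hvj ▸ hr ▸ hmono (i + 1) j hi1 hj h'))
      · have : j = i + 1 := by omega
        subst this
        exact Or.inr (le_of_eq (hvj ▸ hr ▸ rfl))

theorem sum_const_range (l r : Int) (G : Int → Int) (hlr : l ≤ r)
    (h : ∀ x, l ≤ x → x < r → G x = G l) :
    ((PySem.List.pyRange l r).map G).sum = (r - l) * G l := by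
  rw [PySem.List.pyRange_one, List.map_map]
  have : ∀ k ∈ List.range (r - l).toNat, (G ∘ fun k : Nat => l + (k : Int)) k = G l := by
    intro k hk
    simp only [Function.comp_apply]
    exact h _ (by omega) (by have := List.mem_range.mp hk; omega)
  rw [List.map_congr_left this, PySem.List.sum_map_const_int]
  rw [List.length_range]
  have : ((r - l).toNat : Int) = r - l := by omega
  rw [this]

theorem le_getLastD : ∀ (t : List Int) (r : Int), (r :: t).Pairwise (· < ·) →
    r ≤ (r :: t).getLastD 0 := by
  intro t
  induction t with
  | nil => intro r _; simp
  | cons s t' IH =>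
    intro r hp
    have h1 : r < s := (List.pairwise_cons.mp hp).1 s (by simp)
    have h2 := IH s (List.pairwise_cons.mp hp).2
    simp only [List.getLastD_cons] at h2 ⊢
    omega

theorem sum_blocks (G : Int → Int) :
    ∀ (b : List Int), b.Pairwise (· < ·) →
    (∀ l r, (l, r) ∈ b.zip b.tail → ∀ x, l ≤ x → x < r → G x = G l) →
    ((PySem.List.pyRange (b.headD 0) (b.getLastD 0)).map G).sum
      = ((b.zip b.tail).map (fun p => (p.2 - p.1) * G p.1)).sum := by
  intro b
  induction b with
  | nil =>
    intro _ _
    rw [show (([] : List Int)).headD 0 = 0 from rfl, show (([] : List Int)).getLastD 0 = 0 from rfl]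
    rw [PySem.List.pyRange_one_eq_nil le_rfl]
    simp
  | cons l t IH =>
    intro hp hconst
    cases t with
    | nil =>
      rw [show ([l] : List Int).headD 0 = l from rfl, show ([l] : List Int).getLastD 0 = l by simp]
      rw [PySem.List.pyRange_one_eq_nil le_rfl]
      simp
    | cons r t' =>
      have hlr : l < r := (List.pairwise_cons.mp hp).1 r (by simp)
      have hrlast : r ≤ (r :: t').getLastD 0 := le_getLastD t' r (List.pairwise_cons.mp hp).2
      have hlast : (l :: r :: t').getLastD 0 = (r :: t').getLastD 0 := by
        simp [List.getLastD_cons]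
      have hsplit := PySem.List.pyRange_one_append l r ((r :: t').getLastD 0) (by omega) hrlast
      rw [show (l :: r :: t').headD 0 = l from rfl, hlast, hsplit, List.map_append, List.sum_append]
      have h1 : ((PySem.List.pyRange l r).map G).sum = (r - l) * G l :=
        sum_const_range l r G (by omega)
          (fun x hx1 hx2 => hconst l r (by simp [List.zip_cons_cons]) x hx1 hx2)
      have hsub : ∀ a c, (a, c) ∈ (r :: t').zip (r :: t').tail →
          ∀ x, a ≤ x → x < c → G x = G a := by
        intro a c hac x hx1 hx2
        refine hconst a c ?_ x hx1 hx2
        simp only [List.zip_cons_cons, List.tail_cons, List.mem_cons]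
        right
        simpa using hac
      have h2 := IH (List.pairwise_cons.mp hp).2 hsub
      rw [show (r :: t').headD 0 = r from rfl] at h2
      rw [h1, h2]
      simp [List.zip_cons_cons]

theorem headD_zero {b : List Int} (hp : b.Pairwise (· < ·)) (h0 : (0 : Int) ∈ b)
    (hnn : ∀ v ∈ b, (0 : Int) ≤ v) : b.headD 0 = 0 := by
  cases b with
  | nil => simp
  | cons h t =>
    rcases List.mem_cons.mp h0 with he | ht
    · simp [he.symm]
    · have h1 : h < 0 := (List.pairwise_cons.mp hp).1 0 ht
      have h2 : (0 : Int) ≤ h := hnn h (by simp)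
      omega

theorem getLastD_top : ∀ (b : List Int), b.Pairwise (· < ·) → (1000 : Int) ∈ b →
    (∀ v ∈ b, v ≤ (1000 : Int)) → b.getLastD 0 = 1000 := by
  intro b
  induction b with
  | nil => intro _ h; simp at h
  | cons h t IH =>
    intro hp h1 hub
    cases t with
    | nil => simp at h1 ⊢; tauto
    | cons s t' =>
      have hmem : (1000 : Int) ∈ s :: t' := by
        rcases List.mem_cons.mp h1 with he | ht
        · exfalso
          have := (List.pairwise_cons.mp hp).1 s (by simp)
          have := hub s (by simp)
          omega
        · exact ht
      have := IH (List.pairwise_cons.mp hp).2 hmem (fun v hv => hub v (by simp [hv]))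
      simp only [List.getLastD_cons] at this ⊢
      exact this

theorem block_low_iff {b : List Int} (hp : b.Pairwise (· < ·))
    (hmem : ∀ v ∈ b, (0 : Int) ≤ v ∧ v ≤ 1000) {l r : Int} (hadj : (l, r) ∈ b.zip b.tail)
    (a1 a2 : Int) (h1 : 0 < a1 → a1 < 1000 → a1 ∈ b) (h2 : 0 < a2 + 1 → a2 + 1 < 1000 → a2 + 1 ∈ b)
    {x : Int} (hx : l ≤ x ∧ x < r) :
    (a1 ≤ x ∧ x ≤ a2) ↔ (a1 ≤ l ∧ r ≤ a2 + 1) := by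
  obtain ⟨hlb, hrb, hlr, hgap⟩ := adj_facts hp hadj
  have hl0 : (0 : Int) ≤ l := (hmem l hlb).1
  have hr1000 : r ≤ 1000 := (hmem r hrb).2
  constructor
  · rintro ⟨ha1, ha2⟩
    constructor
    · by_contra hlt
      push_neg at hlt
      have ha1b : a1 ∈ b := h1 (by omega) (by omega)
      rcases hgap a1 ha1b with h | h <;> omega
    · by_contra hlt
      push_neg at hlt
      have hb : a2 + 1 ∈ b := h2 (by omega) (by omega)
      rcases hgap (a2 + 1) hb with h | h <;> omega
  · rintro ⟨ha1, ha2⟩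
    omega

-- ---------- assembling the equivalence ----------

theorem double_fold (xs ys : List (Int × Int)) (S : (Int × Int) → (Int × Int) → Int) :
    xs.foldl (fun total xp => ys.foldl (fun total yp =>
        total + S xp yp * (xp.2 - xp.1) * (yp.2 - yp.1)) total) 0
      = (xs.map (fun xp => (ys.map (fun yp =>
          S xp yp * (xp.2 - xp.1) * (yp.2 - yp.1))).sum)).sum := by
  rw [PySem.List.foldl_congr_mem xs _ (fun total xp => total + (ys.map (fun yp =>
        S xp yp * (xp.2 - xp.1) * (yp.2 - yp.1))).sum) 0
      (fun acc xp _ => PySem.List.foldl_add ys _ acc)]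
  rw [PySem.List.foldl_add]
  simp

theorem bounds_pairwise (vs : List Int) : (altBounds vs).Pairwise (· < ·) :=
  PySem.List.sorted_ofList_pairwise_lt _

theorem bounds_mem (vs : List Int) (v : Int) :
    v ∈ altBounds vs ↔ v = 0 ∨ v = 1000 ∨ (v ∈ vs ∧ 0 < v ∧ v < 1000) := by
  unfold altBounds
  rw [PySem.List.mem_sorted, PySem.Set.mem_ofList]
  simp [List.mem_filter]

theorem bounds_le (vs : List Int) (v : Int) (hv : v ∈ altBounds vs) :
    0 ≤ v ∧ v ≤ 1000 := by
  rcases (bounds_mem vs v).mp hv with h | h | h <;> omega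

theorem bounds_zero (vs : List Int) : (0 : Int) ∈ altBounds vs :=
  (bounds_mem vs 0).mpr (Or.inl rfl)

theorem bounds_top (vs : List Int) : (1000 : Int) ∈ altBounds vs :=
  (bounds_mem vs 1000).mpr (Or.inr (Or.inl rfl))

set_option maxHeartbeats 1000000 in
theorem blocks_core (instrs : List (String × Int × Int × Int × Int))
    (hok : ∀ i ∈ instrs, instrOk i) :
    ((List.range 1000).map (fun (r : Nat) => ((List.range 1000).map (fun (c : Nat) =>
        cellVal instrs (r : Int) (c : Int))).sum)).sum
    = ((altBounds (instrs.flatMap (fun i => [i.2.1, i.2.2.2.1 + 1]))).zip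
        (altBounds (instrs.flatMap (fun i => [i.2.1, i.2.2.2.1 + 1]))).tail).foldl (fun total xp =>
        ((altBounds (instrs.flatMap (fun i => [i.2.2.1, i.2.2.2.2 + 1]))).zip
          (altBounds (instrs.flatMap (fun i => [i.2.2.1, i.2.2.2.2 + 1]))).tail).foldl (fun total yp =>
          total + (instrs.filterMap (fun i =>
              if i.2.1 ≤ xp.1 ∧ xp.2 ≤ i.2.2.2.1 + 1 then some (i.1, i.2.2.1, i.2.2.2.2)
              else none)).foldl
            (fun s c => if c.2.1 ≤ yp.1 ∧ yp.2 ≤ c.2.2 + 1 then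
              (if c.1 = "on" then 1 else if c.1 = "off" then 0 else 1 - s) else s) 0
            * (xp.2 - xp.1) * (yp.2 - yp.1)) total) 0 := by
  obtain ⟨xb, hxbdef⟩ : ∃ xb, altBounds (instrs.flatMap (fun i => [i.2.1, i.2.2.2.1 + 1])) = xb :=
    ⟨_, rfl⟩
  obtain ⟨yb, hybdef⟩ : ∃ yb, altBounds (instrs.flatMap (fun i => [i.2.2.1, i.2.2.2.2 + 1])) = yb :=
    ⟨_, rfl⟩
  rw [hxbdef, hybdef]
  have hxp : xb.Pairwise (· < ·) := hxbdef ▸ bounds_pairwise _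
  have hyp : yb.Pairwise (· < ·) := hybdef ▸ bounds_pairwise _
  have hxle : ∀ v ∈ xb, (0 : Int) ≤ v ∧ v ≤ 1000 := fun v hv => bounds_le _ v (hxbdef ▸ hv)
  have hyle : ∀ v ∈ yb, (0 : Int) ≤ v ∧ v ≤ 1000 := fun v hv => bounds_le _ v (hybdef ▸ hv)
  have hxmem : ∀ i ∈ instrs, (0 < i.2.1 → i.2.1 < 1000 → i.2.1 ∈ xb) ∧
      (0 < i.2.2.2.1 + 1 → i.2.2.2.1 + 1 < 1000 → i.2.2.2.1 + 1 ∈ xb) := by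
    intro i hi
    constructor <;> intro h1 h2 <;> rw [← hxbdef] <;>
      refine (bounds_mem _ _).mpr (Or.inr (Or.inr ⟨?_, h1, h2⟩)) <;>
      exact List.mem_flatMap.mpr ⟨i, hi, by simp⟩
  have hymem : ∀ i ∈ instrs, (0 < i.2.2.1 → i.2.2.1 < 1000 → i.2.2.1 ∈ yb) ∧
      (0 < i.2.2.2.2 + 1 → i.2.2.2.2 + 1 < 1000 → i.2.2.2.2 + 1 ∈ yb) := by
    intro i hi
    constructor <;> intro h1 h2 <;> rw [← hybdef] <;>
      refine (bounds_mem _ _).mpr (Or.inr (Or.inr ⟨?_, h1, h2⟩)) <;>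
      exact List.mem_flatMap.mpr ⟨i, hi, by simp⟩
  have hxblock : ∀ l r, (l, r) ∈ xb.zip xb.tail → ∀ x, l ≤ x → x < r →
      ∀ i ∈ instrs, (i.2.1 ≤ x ∧ x ≤ i.2.2.2.1) ↔ (i.2.1 ≤ l ∧ r ≤ i.2.2.2.1 + 1) := by
    intro l r hadj x hx1 hx2 i hi
    exact block_low_iff hxp hxle hadj i.2.1 i.2.2.2.1 (hxmem i hi).1 (hxmem i hi).2 ⟨hx1, hx2⟩
  have hyblock : ∀ l r, (l, r) ∈ yb.zip yb.tail → ∀ y, l ≤ y → y < r →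
      ∀ i ∈ instrs, (i.2.2.1 ≤ y ∧ y ≤ i.2.2.2.2) ↔ (i.2.2.1 ≤ l ∧ r ≤ i.2.2.2.2 + 1) := by
    intro l r hadj y hy1 hy2 i hi
    exact block_low_iff hyp hyle hadj i.2.2.1 i.2.2.2.2 (hymem i hi).1 (hymem i hi).2 ⟨hy1, hy2⟩
  have hcellx : ∀ l r, (l, r) ∈ xb.zip xb.tail → ∀ x, l ≤ x → x < r → ∀ y,
      cellVal instrs x y = cellVal instrs l y := by
    intro l r hadj x hx1 hx2 y
    have hlr : l < r := (adj_facts hxp hadj).2.2.1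
    unfold cellVal
    refine PySem.List.foldl_congr_mem instrs _ _ 0 (fun v i hi => ?_)
    unfold cellApp
    have hiff : (i.2.1 ≤ x ∧ x ≤ i.2.2.2.1 ∧ i.2.2.1 ≤ y ∧ y ≤ i.2.2.2.2)
        ↔ (i.2.1 ≤ l ∧ l ≤ i.2.2.2.1 ∧ i.2.2.1 ≤ y ∧ y ≤ i.2.2.2.2) := by
      have h1 := hxblock l r hadj x hx1 hx2 i hi
      have h2 := hxblock l r hadj l (le_refl l) hlr i hi
      tauto
    rw [if_congr hiff rfl rfl]
  have hcelly : ∀ xv, ∀ l r, (l, r) ∈ yb.zip yb.tail → ∀ y, l ≤ y → y < r →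
      cellVal instrs xv y = cellVal instrs xv l := by
    intro xv l r hadj y hy1 hy2
    have hlr : l < r := (adj_facts hyp hadj).2.2.1
    unfold cellVal
    refine PySem.List.foldl_congr_mem instrs _ _ 0 (fun v i hi => ?_)
    unfold cellApp
    have hiff : (i.2.1 ≤ xv ∧ xv ≤ i.2.2.2.1 ∧ i.2.2.1 ≤ y ∧ y ≤ i.2.2.2.2)
        ↔ (i.2.1 ≤ xv ∧ xv ≤ i.2.2.2.1 ∧ i.2.2.1 ≤ l ∧ l ≤ i.2.2.2.2) := by
      have h1 := hyblock l r hadj y hy1 hy2 i hi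
      have h2 := hyblock l r hadj l (le_refl l) hlr i hi
      tauto
    rw [if_congr hiff rfl rfl]
  have hS : ∀ xp ∈ xb.zip xb.tail, ∀ yp ∈ yb.zip yb.tail,
      (instrs.filterMap (fun i =>
          if i.2.1 ≤ xp.1 ∧ xp.2 ≤ i.2.2.2.1 + 1 then some (i.1, i.2.2.1, i.2.2.2.2) else none)).foldl
        (fun s c => if c.2.1 ≤ yp.1 ∧ yp.2 ≤ c.2.2 + 1 then
          (if c.1 = "on" then 1 else if c.1 = "off" then 0 else 1 - s) else s) 0
      = cellVal instrs xp.1 yp.1 := by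
    intro xp hxadj yp hyadj
    obtain ⟨xl, xr⟩ := xp
    obtain ⟨yl, yr⟩ := yp
    have hxlr : xl < xr := (adj_facts hxp hxadj).2.2.1
    have hylr : yl < yr := (adj_facts hyp hyadj).2.2.1
    rw [List.foldl_filterMap]
    unfold cellVal
    refine PySem.List.foldl_congr_mem instrs _ _ 0 (fun v i hi => ?_)
    have hxiff := hxblock xl xr hxadj xl (le_refl xl) hxlr i hi
    have hyiff := hyblock yl yr hyadj yl (le_refl yl) hylr i hi
    unfold cellApp updSt
    dsimp only
    by_cases hxc : i.2.1 ≤ xl ∧ xr ≤ i.2.2.2.1 + 1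
    · rw [if_pos hxc]
      dsimp only
      by_cases hyc : i.2.2.1 ≤ yl ∧ yr ≤ i.2.2.2.2 + 1
      · rw [if_pos hyc, if_pos (show i.2.1 ≤ xl ∧ xl ≤ i.2.2.2.1 ∧ i.2.2.1 ≤ yl ∧ yl ≤ i.2.2.2.2
          from ⟨(hxiff.mpr hxc).1, (hxiff.mpr hxc).2, (hyiff.mpr hyc).1, (hyiff.mpr hyc).2⟩)]
      · rw [if_neg hyc, if_neg (show ¬(i.2.1 ≤ xl ∧ xl ≤ i.2.2.2.1 ∧ i.2.2.1 ≤ yl ∧ yl ≤ i.2.2.2.2)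
          from fun hh => hyc (hyiff.mp ⟨hh.2.2.1, hh.2.2.2⟩))]
    · rw [if_neg hxc, if_neg (show ¬(i.2.1 ≤ xl ∧ xl ≤ i.2.2.2.1 ∧ i.2.2.1 ≤ yl ∧ yl ≤ i.2.2.2.2)
          from fun hh => hxc (hxiff.mp ⟨hh.1, hh.2.1⟩))]
  have hcast : ∀ (Gf : Int → Int), ((PySem.List.pyRange 0 1000).map Gf).sum
      = ((List.range 1000).map (fun (k : Nat) => Gf (k : Int))).sum := by
    intro Gf
    rw [PySem.List.pyRange_zero, List.map_map]
    rfl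
  have hx0 : xb.headD 0 = 0 :=
    headD_zero hxp (hxbdef ▸ bounds_zero _) (fun v hv => (hxle v hv).1)
  have hx1 : xb.getLastD 0 = 1000 :=
    getLastD_top _ hxp (hxbdef ▸ bounds_top _) (fun v hv => (hxle v hv).2)
  have hy0 : yb.headD 0 = 0 :=
    headD_zero hyp (hybdef ▸ bounds_zero _) (fun v hv => (hyle v hv).1)
  have hy1 : yb.getLastD 0 = 1000 :=
    getLastD_top _ hyp (hybdef ▸ bounds_top _) (fun v hv => (hyle v hv).2)
  rw [double_fold (xb.zip xb.tail) (yb.zip yb.tail) (fun xp yp => (instrs.filterMap (fun i =>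
      if i.2.1 ≤ xp.1 ∧ xp.2 ≤ i.2.2.2.1 + 1 then some (i.1, i.2.2.1, i.2.2.2.2) else none)).foldl
      (fun s c => if c.2.1 ≤ yp.1 ∧ yp.2 ≤ c.2.2 + 1 then
        (if c.1 = "on" then 1 else if c.1 = "off" then 0 else 1 - s) else s) 0)]
  have hinner : ∀ (xv : Int), ((List.range 1000).map (fun (c : Nat) =>
      cellVal instrs xv (c : Int))).sum
      = ((yb.zip yb.tail).map (fun yp => (yp.2 - yp.1) * cellVal instrs xv yp.1)).sum := by
    intro xv
    rw [← hcast (fun y => cellVal instrs xv y)]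
    rw [show (0 : Int) = yb.headD 0 from hy0.symm, show (1000 : Int) = yb.getLastD 0 from hy1.symm]
    exact sum_blocks _ yb hyp (fun l r hadj y h1 h2 => hcelly xv l r hadj y h1 h2)
  calc ((List.range 1000).map (fun (r : Nat) => ((List.range 1000).map (fun (c : Nat) =>
          cellVal instrs (r : Int) (c : Int))).sum)).sum
      = ((PySem.List.pyRange 0 1000).map (fun x => ((yb.zip yb.tail).map
          (fun yp => (yp.2 - yp.1) * cellVal instrs x yp.1)).sum)).sum := by
        rw [hcast]
        exact congrArg List.sum (List.map_congr_left (fun r _ => hinner (r : Int)))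
    _ = ((xb.zip xb.tail).map (fun xp => (xp.2 - xp.1) *
          ((yb.zip yb.tail).map (fun yp => (yp.2 - yp.1) * cellVal instrs xp.1 yp.1)).sum)).sum := by
        rw [show (0 : Int) = xb.headD 0 from hx0.symm,
            show (1000 : Int) = xb.getLastD 0 from hx1.symm]
        refine sum_blocks _ xb hxp (fun l r hadj x h1 h2 => ?_)
        exact congrArg List.sum (List.map_congr_left
          (fun yp _ => by rw [hcellx l r hadj x h1 h2 yp.1]))
    _ = _ := by
        refine congrArg List.sum (List.map_congr_left (fun xp hxp' => ?_))
        rw [show ((yb.zip yb.tail).map (fun yp =>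
              (instrs.filterMap (fun i => if i.2.1 ≤ xp.1 ∧ xp.2 ≤ i.2.2.2.1 + 1
                then some (i.1, i.2.2.1, i.2.2.2.2) else none)).foldl
              (fun s c => if c.2.1 ≤ yp.1 ∧ yp.2 ≤ c.2.2 + 1 then
                (if c.1 = "on" then 1 else if c.1 = "off" then 0 else 1 - s) else s) 0
              * (xp.2 - xp.1) * (yp.2 - yp.1)))
            = ((yb.zip yb.tail).map (fun yp =>
              (xp.2 - xp.1) * ((yp.2 - yp.1) * cellVal instrs xp.1 yp.1)))
          from List.map_congr_left (fun yp hyp' => by rw [hS xp hxp' yp hyp']; ring)]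
        rw [List.sum_map_mul_left]

set_option maxHeartbeats 1000000 in
theorem part1_main (text : String) (hpre : Pre_part1 text) :
    part1 text = part1_alt text := by
  have hok : ∀ i ∈ (PySem.Str.splitlines text).map part1Parse, instrOk i := by
    intro i hi
    obtain ⟨l, hl, rfl⟩ := List.mem_map.mp hi
    exact parse_ok l (hpre l hl)
  have halt : (PySem.Str.splitlines text).map altParse
      = (PySem.Str.splitlines text).map part1Parse :=
    List.map_congr_left (fun l _ => alt_parse_eq l)
  rw [partA_sum text hok]
  rw [show part1_alt text = ((altBounds (((PySem.Str.splitlines text).map altParse).flatMap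
        (fun i => [i.2.1, i.2.2.2.1 + 1]))).zip (altBounds (((PySem.Str.splitlines text).map
        altParse).flatMap (fun i => [i.2.1, i.2.2.2.1 + 1]))).tail).foldl (fun total xp =>
      ((altBounds (((PySem.Str.splitlines text).map altParse).flatMap
        (fun i => [i.2.2.1, i.2.2.2.2 + 1]))).zip (altBounds (((PySem.Str.splitlines text).map
        altParse).flatMap (fun i => [i.2.2.1, i.2.2.2.2 + 1]))).tail).foldl (fun total yp =>
        total + (((PySem.Str.splitlines text).map altParse).filterMap (fun i =>
            if i.2.1 ≤ xp.1 ∧ xp.2 ≤ i.2.2.2.1 + 1 then some (i.1, i.2.2.1, i.2.2.2.2)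
            else none)).foldl
          (fun s c => if c.2.1 ≤ yp.1 ∧ yp.2 ≤ c.2.2 + 1 then
            (if c.1 = "on" then 1 else if c.1 = "off" then 0 else 1 - s) else s) 0
          * (xp.2 - xp.1) * (yp.2 - yp.1)) total) 0 from rfl]
  rw [halt]
  exact blocks_core ((PySem.Str.splitlines text).map part1Parse) hok

-- ===== VERDICT (by name: the statement is the Claim_ definition above) =====
theorem part1_spec : Claim_equal_part1 := by
  intro text _ hpre
  unfold Spec_part1
  exact part1_main text hpre
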